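-- pv_equiv track=rewrite | github.com/wyk18703232953/myResearch | codeComplex/data/filteredData/python/linear/python_linear_0480.py | core_logic
-- ===== SOURCE A (Python) =====
-- def intersection(l1, r1, l2, r2):
--     if l1 > r2 or r1 < l2:
--         return [0, 0]
--
--     else:
--         return [max(l1, l2), min(r1, r2)]
--
-- def core_logic(z):
--     n = len(z)
--     if n == 0:
--         return 0
--     pref = []
--     suff = []
--
--     pix, piy = intersection(z[0][0], z[0][1], z[0][0], z[0][1])
--     six, siy = intersection(z[-1][0], z[-1][1], z[-1][0], z[-1][1])
--
--     for i in range(n):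
--         pix, piy = intersection(pix, piy, z[i][0], z[i][1])
--         pref.append([pix, piy])
--
--     for i in range(n - 1, -1, -1):
--         six, siy = intersection(six, siy, z[i][0], z[i][1])
--         suff.append([six, siy])
--
--     suff = suff[::-1]
--
--     if n == 1:
--         return 0
--
--     ans = max(suff[1][1] - suff[1][0], pref[n - 2][1] - pref[n - 2][0])
--     for i in range(1, n - 1):
--         inter = intersection(pref[i - 1][0], pref[i - 1][1], suff[i + 1][0], suff[i + 1][1])
--         ans = max(ans, inter[1] - inter[0])
--     return ans
-- ===== SOURCE B (Python) =====
-- def core_logic(z):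
--     n = len(z)
--     if n <= 1:
--         return 0
--     ls = sorted((row[0] for row in z), reverse=True)  # two largest left endpoints
--     rs = sorted(row[1] for row in z)                  # two smallest right endpoints
--     best = 0
--     for row in z:
--         L = ls[1] if (row[0] == ls[0] and ls[0] != ls[1]) else ls[0]
--         R = rs[1] if (row[1] == rs[0] and rs[0] != rs[1]) else rs[0]
--         best = max(best, R - L)
--     return best
-- ===== Notes on version B (the rewrite author's own statement) =====
-- stated objective: alternative
-- what changed: Replaces the sentinel-based prefix/suffix intersection arrays by sorting the left and right endpoints once and computing each leave-one-out intersection from the top-two extremes, clamping empty intersections to 0.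
import Mathlib
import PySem

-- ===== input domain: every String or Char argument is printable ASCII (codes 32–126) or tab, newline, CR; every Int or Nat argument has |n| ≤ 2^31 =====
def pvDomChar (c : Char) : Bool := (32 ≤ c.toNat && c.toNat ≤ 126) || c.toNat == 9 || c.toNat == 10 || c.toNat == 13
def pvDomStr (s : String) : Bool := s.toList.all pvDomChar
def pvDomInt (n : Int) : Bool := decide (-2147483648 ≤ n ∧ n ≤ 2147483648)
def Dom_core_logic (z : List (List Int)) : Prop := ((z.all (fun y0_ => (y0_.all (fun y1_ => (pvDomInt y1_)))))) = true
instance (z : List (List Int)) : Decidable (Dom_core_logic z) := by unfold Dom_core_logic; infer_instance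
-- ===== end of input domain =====

-- B replaces A's sentinel prefix/suffix intersection arrays by a different algorithm:
-- sort the endpoints once and compute each leave-one-out intersection from the top-two extremes.

-- ===== PORT A =====
-- z[i][0] / z[i][1]; the .getD default is only reachable outside Pre_core_logic (where Python raises IndexError)
def pvRow0 (row : List Int) : Int := (PySem.List.pyGet? row 0).getD 0
def pvRow1 (row : List Int) : Int := (PySem.List.pyGet? row 1).getD 0

def pvInter (l1 r1 l2 r2 : Int) : Int × Int :=
  if l1 > r2 ∨ r1 < l2 then (0, 0) else (max l1 l2, min r1 r2)

def core_logic (z : List (List Int)) : Int :=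
  let n : Int := z.length
  if n = 0 then 0
  else
    let z0 : List Int := (PySem.List.pyGet? z 0).getD []
    let zl : List Int := (PySem.List.pyGet? z (-1)).getD []
    let p0 : Int × Int := pvInter (pvRow0 z0) (pvRow1 z0) (pvRow0 z0) (pvRow1 z0)
    let s0 : Int × Int := pvInter (pvRow0 zl) (pvRow1 zl) (pvRow0 zl) (pvRow1 zl)
    -- for i in range(n): state = intersection(state, z[i]); pref.append(state)
    let fwd := z.foldl (fun (acc : (Int × Int) × List (Int × Int)) row =>
      let st := pvInter acc.1.1 acc.1.2 (pvRow0 row) (pvRow1 row); (st, acc.2 ++ [st])) (p0, [])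
    let pref := fwd.2
    -- for i in range(n-1, -1, -1): iterates z in reverse order
    let bwd := z.reverse.foldl (fun (acc : (Int × Int) × List (Int × Int)) row =>
      let st := pvInter acc.1.1 acc.1.2 (pvRow0 row) (pvRow1 row); (st, acc.2 ++ [st])) (s0, [])
    let suff := bwd.2.reverse   -- suff = suff[::-1]  (PySem.List.slice?_none_none_neg_one: [::-1] is reverse)
    if n = 1 then 0
    else
      let gp : Int → Int × Int := fun i => (PySem.List.pyGet? pref i).getD (0, 0)
      let gs : Int → Int × Int := fun i => (PySem.List.pyGet? suff i).getD (0, 0)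
      let ans0 := max ((gs 1).2 - (gs 1).1) ((gp (n - 2)).2 - (gp (n - 2)).1)
      (PySem.List.pyRange 1 (n - 1) 1).foldl (fun ans i =>
        let it := pvInter (gp (i - 1)).1 (gp (i - 1)).2 (gs (i + 1)).1 (gs (i + 1)).2
        max ans (it.2 - it.1)) ans0

-- ===== PORT B =====
def core_logic_alt (z : List (List Int)) : Int :=
  let n : Int := z.length
  if n ≤ 1 then 0
  else
    let ls := PySem.List.sorted (z.map pvRow0) (fun x => x) true   -- sorted lefts, descending
    let rs := PySem.List.sorted (z.map pvRow1) (fun x => x) false  -- sorted rights, ascending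
    let l0 := (PySem.List.pyGet? ls 0).getD 0
    let l1 := (PySem.List.pyGet? ls 1).getD 0
    let r0 := (PySem.List.pyGet? rs 0).getD 0
    let r1 := (PySem.List.pyGet? rs 1).getD 0
    z.foldl (fun best row =>
      let L := if pvRow0 row = l0 ∧ l0 ≠ l1 then l1 else l0
      let R := if pvRow1 row = r0 ∧ r0 ≠ r1 then r1 else r0
      max best (R - L)) 0

-- ===== PRECONDITION & SPEC =====
-- Pre_ excludes exactly the inputs where Python A raises IndexError: an inner list with fewer than 2 elements.
def Pre_core_logic (z : List (List Int)) : Prop := ∀ row ∈ z, 2 ≤ row.length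
instance (z : List (List Int)) : Decidable (Pre_core_logic z) := by unfold Pre_core_logic; infer_instance
def pvWitness_core_logic : List (List Int) := [[0, 4], [1, 3]]

def Spec_core_logic (z : List (List Int)) (out : Int) : Prop := out = core_logic_alt z
instance (z : List (List Int)) (out : Int) : Decidable (Spec_core_logic z out) := by unfold Spec_core_logic; infer_instance

-- ===== CLAIM (what is proved, stated in full; the proofs are below) =====
def Claim_equal_core_logic : Prop := ∀ (z : List (List Int)), Dom_core_logic z → Pre_core_logic z → Spec_core_logic z (core_logic z)

-- ===== LEMMAS AND PROOFS =====

-- proof-side definitions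
def pvD (p : Int × Int) : Int := p.2 - p.1
def pvI (s p : Int × Int) : Int × Int := pvInter s.1 s.2 p.1 p.2
def pvN (p : Int × Int) : Int × Int := pvI p p
def pvFF (s : Int × Int) (l : List (Int × Int)) : Int × Int := l.foldl pvI s
def pvScan (s : Int × Int) : List (Int × Int) → List (Int × Int)
  | [] => []
  | p :: t => pvI s p :: pvScan (pvI s p) t
def pvMax (a : Int) (l : List Int) : Int := l.foldl max a
def pvMin (a : Int) (l : List Int) : Int := l.foldl min a
def pvMaxOf : List Int → Int
  | [] => 0
  | x :: t => pvMax x t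
def pvMinOf : List Int → Int
  | [] => 0
  | x :: t => pvMin x t
def pvPs (z : List (List Int)) : List (Int × Int) := z.map (fun row => (pvRow0 row, pvRow1 row))
def pvPk (ps : List (Int × Int)) (k : Nat) : Int × Int := pvFF (pvN ps.headI) (ps.take (k + 1))
def pvSj (ps : List (Int × Int)) (j : Nat) : Int × Int :=
  pvFF (pvN ps.reverse.headI) (ps.reverse.take (ps.length - j))
def pvCand (ps : List (Int × Int)) (i : Nat) : Int :=
  if i = 0 then pvD (pvSj ps 1)
  else if i = ps.length - 1 then pvD (pvPk ps (ps.length - 2))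
  else pvD (pvI (pvPk ps (i - 1)) (pvSj ps (i + 1)))
def pvLex (ps : List (Int × Int)) (i : Nat) : Int := pvMaxOf ((ps.map Prod.fst).eraseIdx i)
def pvRex (ps : List (Int × Int)) (i : Nat) : Int := pvMinOf ((ps.map Prod.snd).eraseIdx i)
def pvTT (ps : List (Int × Int)) (i : Nat) : Int := pvRex ps i - pvLex ps i

-- intersection algebra
theorem pvI_def (s p : Int × Int) :
    pvI s p = if s.1 > p.2 ∨ s.2 < p.1 then ((0 : Int), (0 : Int)) else (max s.1 p.1, min s.2 p.2) := rfl

theorem pvI_self (p : Int × Int) : pvI (pvI p p) p = pvI p p := by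
  rcases p with ⟨a, b⟩
  simp only [pvI_def]
  split_ifs with h1 h2 h3 <;> simp_all [Prod.ext_iff] <;> omega

theorem pvI_zero_left (p : Int × Int) : pvI (0, 0) p = (0, 0) := by
  rcases p with ⟨a, b⟩
  simp only [pvI_def]
  split_ifs with h
  · rfl
  · simp only [not_or, not_lt] at h; simp [Prod.ext_iff]; omega

theorem pvI_d_nonneg {s p : Int × Int} (hs : s.1 ≤ s.2) (hp : p.1 ≤ p.2) :
    (pvI s p).1 ≤ (pvI s p).2 := by
  rcases s with ⟨a, b⟩; rcases p with ⟨c, d⟩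
  simp only [pvI_def]
  split_ifs with h <;> simp_all <;> omega

theorem pvI_invalid_enter {s p : Int × Int} (hs : s.1 ≤ s.2)
    (h : (pvI s p).2 < (pvI s p).1) : p.2 < p.1 ∧ pvI s p = p := by
  rcases s with ⟨a, b⟩; rcases p with ⟨c, d⟩
  simp only [pvI_def] at h ⊢
  split_ifs at h ⊢ with hc
  · simp at h
  · simp only [not_or, not_lt] at hc
    simp only at hs
    simp only [Prod.mk.injEq]
    simp at h
    exact ⟨by omega, by omega, by omega⟩

theorem pvI_invalid_invalid {s p : Int × Int} (hs : s.2 < s.1) (hp : p.2 < p.1) :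
    pvI s p = (0, 0) := by
  rcases s with ⟨a, b⟩; rcases p with ⟨c, d⟩
  simp only [pvI_def]
  split_ifs with h
  · rfl
  · simp only [not_or, not_lt] at h; omega

-- fold-max / fold-min toolkit
theorem le_pvMax_init (a : Int) (l : List Int) : a ≤ pvMax a l := by
  induction l generalizing a with
  | nil => simp [pvMax]
  | cons x t ih =>
      have := ih (max a x)
      simp only [pvMax, List.foldl] at *
      exact le_trans (le_max_left a x) this

theorem le_pvMax_mem {x : Int} {l : List Int} (a : Int) (h : x ∈ l) : x ≤ pvMax a l := by
  induction l generalizing a with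
  | nil => cases h
  | cons y t ih =>
      rcases List.mem_cons.1 h with rfl | h'
      · exact le_trans (le_max_right a x) (le_pvMax_init _ t)
      · exact ih (max a y) h'

theorem pvMax_le {a c : Int} {l : List Int} (ha : a ≤ c) (hl : ∀ x ∈ l, x ≤ c) :
    pvMax a l ≤ c := by
  induction l generalizing a with
  | nil => simpa [pvMax] using ha
  | cons x t ih =>
      exact ih (max_le ha (hl x (List.mem_cons_self ..))) (fun y hy => hl y (List.mem_cons_of_mem _ hy))

theorem pvMax_all_le {a : Int} {l : List Int} (h : ∀ x ∈ l, x ≤ a) : pvMax a l = a :=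
  le_antisymm (pvMax_le le_rfl h) (le_pvMax_init a l)

theorem pvMax_append (a : Int) (l l' : List Int) : pvMax a (l ++ l') = pvMax (pvMax a l) l' := by
  simp [pvMax, List.foldl_append]

theorem pvMax_init_max (l : List Int) (a b : Int) : pvMax (max a b) l = max a (pvMax b l) := by
  induction l generalizing a b with
  | nil => simp [pvMax]
  | cons x t ih =>
      have h1 : pvMax (max a b) (x :: t) = pvMax (max (max a b) x) t := rfl
      have h3 : max (max a b) x = max a (max b x) := by omega
      rw [h1, h3, ih a (max b x)]
      rfl

theorem pvMax_cons (a b : Int) (l : List Int) : pvMax a (b :: l) = max a (pvMax b l) := by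
  have h1 : pvMax a (b :: l) = pvMax (max a b) l := rfl
  rw [h1, pvMax_init_max]

theorem ge_pvMin_init (a : Int) (l : List Int) : pvMin a l ≤ a := by
  induction l generalizing a with
  | nil => simp [pvMin]
  | cons x t ih =>
      have := ih (min a x)
      simp only [pvMin, List.foldl] at *
      exact le_trans this (min_le_left a x)

theorem pvMin_le_mem {x : Int} {l : List Int} (a : Int) (h : x ∈ l) : pvMin a l ≤ x := by
  induction l generalizing a with
  | nil => cases h
  | cons y t ih =>
      rcases List.mem_cons.1 h with rfl | h'
      · exact le_trans (ge_pvMin_init _ t) (min_le_right a x)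
      · exact ih (min a y) h'

theorem le_pvMin {a c : Int} {l : List Int} (ha : c ≤ a) (hl : ∀ x ∈ l, c ≤ x) :
    c ≤ pvMin a l := by
  induction l generalizing a with
  | nil => simpa [pvMin] using ha
  | cons x t ih =>
      exact ih (le_min ha (hl x (List.mem_cons_self ..))) (fun y hy => hl y (List.mem_cons_of_mem _ hy))

theorem pvMin_all_ge {a : Int} {l : List Int} (h : ∀ x ∈ l, a ≤ x) : pvMin a l = a :=
  le_antisymm (ge_pvMin_init a l) (le_pvMin le_rfl h)

theorem pvMin_append (a : Int) (l l' : List Int) : pvMin a (l ++ l') = pvMin (pvMin a l) l' := by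
  simp [pvMin, List.foldl_append]

theorem pvMin_init_min (l : List Int) (a b : Int) : pvMin (min a b) l = min a (pvMin b l) := by
  induction l generalizing a b with
  | nil => simp [pvMin]
  | cons x t ih =>
      have h1 : pvMin (min a b) (x :: t) = pvMin (min (min a b) x) t := rfl
      have h3 : min (min a b) x = min a (min b x) := by omega
      rw [h1, h3, ih a (min b x)]
      rfl

theorem pvMin_cons (a b : Int) (l : List Int) : pvMin a (b :: l) = min a (pvMin b l) := by
  have h1 : pvMin a (b :: l) = pvMin (min a b) l := rfl
  rw [h1, pvMin_init_min]

-- nonempty max/min (pvMaxOf / pvMinOf): characterised by membership and bound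
theorem pvMax_mem (a : Int) (l : List Int) : pvMax a l ∈ a :: l := by
  induction l generalizing a with
  | nil => simp [pvMax]
  | cons x t ih =>
      have h1 : pvMax a (x :: t) = pvMax (max a x) t := rfl
      rw [h1]
      rcases List.mem_cons.1 (ih (max a x)) with h | h
      · rcases max_choice a x with h' | h'
        · rw [h, h']; exact List.mem_cons_self ..
        · rw [h, h']; simp
      · simp [h]

theorem pvMaxOf_mem {l : List Int} (h : l ≠ []) : pvMaxOf l ∈ l := by
  cases l with
  | nil => simp at h
  | cons x t => exact pvMax_mem x t

theorem le_pvMaxOf {x : Int} {l : List Int} (h : x ∈ l) : x ≤ pvMaxOf l := by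
  cases l with
  | nil => cases h
  | cons y t =>
      rcases List.mem_cons.1 h with rfl | h'
      · exact le_pvMax_init x t
      · exact le_pvMax_mem y h'

theorem pvMaxOf_perm {l l' : List Int} (h : l.Perm l') (hne : l ≠ []) :
    pvMaxOf l = pvMaxOf l' := by
  have hne' : l' ≠ [] := fun e => hne (List.Perm.eq_nil (e ▸ h))
  exact le_antisymm (le_pvMaxOf (h.mem_iff.1 (pvMaxOf_mem hne)))
    (le_pvMaxOf (h.mem_iff.2 (pvMaxOf_mem hne')))

theorem pvMin_mem (a : Int) (l : List Int) : pvMin a l ∈ a :: l := by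
  induction l generalizing a with
  | nil => simp [pvMin]
  | cons x t ih =>
      have h1 : pvMin a (x :: t) = pvMin (min a x) t := rfl
      rw [h1]
      rcases List.mem_cons.1 (ih (min a x)) with h | h
      · rcases min_choice a x with h' | h'
        · rw [h, h']; exact List.mem_cons_self ..
        · rw [h, h']; simp
      · simp [h]

theorem pvMinOf_mem {l : List Int} (h : l ≠ []) : pvMinOf l ∈ l := by
  cases l with
  | nil => simp at h
  | cons x t => exact pvMin_mem x t

theorem pvMinOf_le {x : Int} {l : List Int} (h : x ∈ l) : pvMinOf l ≤ x := by
  cases l with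
  | nil => cases h
  | cons y t =>
      rcases List.mem_cons.1 h with rfl | h'
      · exact ge_pvMin_init x t
      · exact pvMin_le_mem y h'

theorem pvMinOf_perm {l l' : List Int} (h : l.Perm l') (hne : l ≠ []) :
    pvMinOf l = pvMinOf l' := by
  have hne' : l' ≠ [] := fun e => hne (List.Perm.eq_nil (e ▸ h))
  exact le_antisymm (pvMinOf_le (h.mem_iff.2 (pvMinOf_mem hne')))
    (pvMinOf_le (h.mem_iff.1 (pvMinOf_mem hne)))



-- invariant: a fold state is either (maxL, minR) of everything folded in, or the (0,0) sentinel
-- with an empty true intersection (minR ≤ maxL)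
def pvInv (s : Int × Int) (L R : Int) : Prop := s = (L, R) ∨ (s = (0, 0) ∧ R ≤ L)

theorem pvInv_step {s : Int × Int} {L R : Int} (h : pvInv s L R) (p : Int × Int) :
    pvInv (pvI s p) (max L p.1) (min R p.2) := by
  rcases h with rfl | ⟨rfl, hLR⟩
  · rcases p with ⟨c, d⟩
    simp only [pvI_def]
    split_ifs with hc
    · right; refine ⟨rfl, ?_⟩; simp only at hc; omega
    · left; rfl
  · rw [pvI_zero_left]
    right
    refine ⟨rfl, ?_⟩
    have h1 : min R p.2 ≤ R := min_le_left _ _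
    have h2 : L ≤ max L p.1 := le_max_left _ _
    omega

theorem pvInv_fold {s : Int × Int} {L R : Int} (h : pvInv s L R) (l : List (Int × Int)) :
    pvInv (pvFF s l) (pvMax L (l.map Prod.fst)) (pvMin R (l.map Prod.snd)) := by
  induction l generalizing s L R with
  | nil => exact h
  | cons p t ih => exact ih (pvInv_step h p)

theorem pvInv_init (p : Int × Int) : pvInv (pvN p) p.1 p.2 := by
  rcases p with ⟨a, b⟩
  unfold pvN
  simp only [pvI_def]
  split_ifs with h
  · right; refine ⟨rfl, ?_⟩; simp only at h; omega
  · left; simp [Prod.ext_iff]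

theorem pvN_d_nonneg (p : Int × Int) : 0 ≤ pvD (pvN p) := by
  rcases p with ⟨a, b⟩
  unfold pvN pvD
  simp only [pvI_def]
  split_ifs with h <;> simp only at h ⊢ <;> simp <;> omega

-- scan characterisation
theorem pvScan_length (s : Int × Int) (l : List (Int × Int)) : (pvScan s l).length = l.length := by
  induction l generalizing s with
  | nil => rfl
  | cons p t ih => simp [pvScan, ih]

theorem pvScan_getElem (l : List (Int × Int)) (s : Int × Int) (k : Nat) (hk : k < l.length) :
    (pvScan s l)[k]'(by rw [pvScan_length]; exact hk) = pvFF s (l.take (k + 1)) := by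
  induction l generalizing s k with
  | nil => simp at hk
  | cons p t ih =>
      cases k with
      | zero => simp [pvScan, pvFF]
      | succ k' =>
          have hk' : k' < t.length := by simpa using hk
          simp only [pvScan, List.getElem_cons_succ, List.take_succ_cons]
          rw [ih (pvI s p) k' hk']
          rfl

theorem pvFold_scan (l : List (List Int)) (s : Int × Int) (pre : List (Int × Int)) :
    l.foldl (fun (acc : (Int × Int) × List (Int × Int)) row =>
      (pvInter acc.1.1 acc.1.2 (pvRow0 row) (pvRow1 row),
       acc.2 ++ [pvInter acc.1.1 acc.1.2 (pvRow0 row) (pvRow1 row)])) (s, pre)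
    = (pvFF s (l.map (fun row => (pvRow0 row, pvRow1 row))),
       pre ++ pvScan s (l.map (fun row => (pvRow0 row, pvRow1 row)))) := by
  induction l generalizing s pre with
  | nil => simp [pvFF, pvScan]
  | cons row t ih =>
      simp only [List.foldl_cons, List.map_cons]
      rw [ih]
      simp [pvFF, pvScan, pvI, List.append_assoc]

theorem pvFold_scan_snd (l : List (List Int)) (s : Int × Int) (pre : List (Int × Int)) :
    (l.foldl (fun (acc : (Int × Int) × List (Int × Int)) row =>
      (pvInter acc.1.1 acc.1.2 (pvRow0 row) (pvRow1 row),
       acc.2 ++ [pvInter acc.1.1 acc.1.2 (pvRow0 row) (pvRow1 row)])) (s, pre)).2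
    = pre ++ pvScan s (l.map (fun row => (pvRow0 row, pvRow1 row))) := by
  rw [pvFold_scan]

-- prefix / suffix states
theorem pvPk_zero {h : Int × Int} (t : List (Int × Int)) : pvPk (h :: t) 0 = pvN h := by
  unfold pvPk pvFF
  simp only [List.headI, List.take_succ_cons, List.take_zero, List.foldl_cons, List.foldl_nil]
  exact pvI_self h

theorem pvPk_inv {ps : List (Int × Int)} (hne : ps ≠ []) (k : Nat) :
    pvInv (pvPk ps k) (pvMaxOf ((ps.take (k + 1)).map Prod.fst))
      (pvMinOf ((ps.take (k + 1)).map Prod.snd)) := by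
  obtain ⟨h, t, rfl⟩ : ∃ h t, ps = h :: t := by
    cases ps with
    | nil => simp at hne
    | cons a b => exact ⟨a, b, rfl⟩
  unfold pvPk
  simp only [List.headI, List.take_succ_cons, List.map_cons]
  show pvInv (pvFF (pvI (pvN h) h) (t.take k)) (pvMax h.1 ((t.take k).map Prod.fst))
      (pvMin h.2 ((t.take k).map Prod.snd))
  rw [show pvI (pvN h) h = pvN h from pvI_self h]
  exact pvInv_fold (pvInv_init h) (t.take k)

theorem pvPk_succ {ps : List (Int × Int)} (k : Nat) (hk : k + 1 < ps.length) :
    pvPk ps (k + 1) = pvI (pvPk ps k) (ps[k + 1]'hk) := by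
  unfold pvPk
  have e : List.take (k + 1 + 1) ps = List.take (k + 1) ps ++ [ps[k + 1]'hk] := by
    rw [List.take_succ, List.getElem?_eq_getElem hk]
    rfl
  rw [e]
  unfold pvFF
  rw [List.foldl_append]
  rfl

theorem pvSj_inv {ps : List (Int × Int)} (j : Nat) (hj : j < ps.length) :
    pvInv (pvSj ps j) (pvMaxOf ((ps.drop j).map Prod.fst))
      (pvMinOf ((ps.drop j).map Prod.snd)) := by
  obtain ⟨rh, rt, hrev⟩ : ∃ rh rt, ps.reverse = rh :: rt := by
    cases hrev : ps.reverse with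
    | nil =>
        have hl : ps.length = 0 := by simpa using congrArg List.length hrev
        omega
    | cons a b => exact ⟨a, b, rfl⟩
  have hnj : ps.length - j = (ps.length - j - 1) + 1 := by omega
  have hperm : (rh :: rt.take (ps.length - j - 1)).Perm (ps.drop j) := by
    have h1 : rh :: rt.take (ps.length - j - 1) = ps.reverse.take (ps.length - j) := by
      rw [hrev]
      conv_rhs => rw [hnj, List.take_succ_cons]
    have h2 : ps.reverse.take (ps.length - j) = (ps.drop j).reverse := by
      rw [← List.reverse_drop]
    rw [h1, h2]
    exact List.reverse_perm _
  have hne2 : rh :: rt.take (ps.length - j - 1) ≠ [] := by simp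
  have hMax : pvMaxOf ((ps.drop j).map Prod.fst)
      = pvMax rh.1 ((rt.take (ps.length - j - 1)).map Prod.fst) := by
    rw [← pvMaxOf_perm (hperm.map Prod.fst) (by simp)]
    rfl
  have hMin : pvMinOf ((ps.drop j).map Prod.snd)
      = pvMin rh.2 ((rt.take (ps.length - j - 1)).map Prod.snd) := by
    rw [← pvMinOf_perm (hperm.map Prod.snd) (by simp)]
    rfl
  have e3 : (rh :: rt).take (ps.length - j) = rh :: rt.take (ps.length - j - 1) := by
    conv_lhs => rw [hnj, List.take_succ_cons]
  rw [hMax, hMin]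
  unfold pvSj
  rw [hrev, e3]
  simp only [List.headI]
  show pvInv (pvFF (pvI (pvN rh) rh) (rt.take (ps.length - j - 1))) _ _
  rw [show pvI (pvN rh) rh = pvN rh from pvI_self rh]
  exact pvInv_fold (pvInv_init rh) (rt.take (ps.length - j - 1))

theorem pvSj_step {ps : List (Int × Int)} (j : Nat) (hj : j + 1 < ps.length) :
    pvSj ps j = pvI (pvSj ps (j + 1)) (ps[j]'(by omega)) := by
  unfold pvSj
  have e1 : ps.length - j = (ps.length - (j + 1)) + 1 := by omega
  have hm : ps.length - (j + 1) < ps.reverse.length := by simp; omega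
  have e2 : ps.reverse.take (ps.length - (j + 1) + 1)
      = ps.reverse.take (ps.length - (j + 1)) ++ [ps.reverse[ps.length - (j + 1)]'hm] := by
    rw [List.take_succ, List.getElem?_eq_getElem hm]; rfl
  have he : ps.reverse[ps.length - (j + 1)]'hm = ps[j]'(by omega) := by
    rw [List.getElem_reverse]
    congr 1
    omega
  rw [e1, e2, he]
  unfold pvFF
  rw [List.foldl_append]
  rfl

theorem pvExistsFirstNeg (f : Nat → Int) : ∀ b, 0 ≤ f 0 → f b < 0 →
    ∃ m, 1 ≤ m ∧ m ≤ b ∧ f m < 0 ∧ 0 ≤ f (m - 1) := by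
  intro b
  induction b with
  | zero => intro h0 hb; omega
  | succ b ih =>
      intro h0 hb
      by_cases hfb : 0 ≤ f b
      · exact ⟨b + 1, by omega, le_rfl, hb, by simpa using hfb⟩
      · obtain ⟨m, h1, h2, h3, h4⟩ := ih h0 (by omega)
        exact ⟨m, h1, by omega, h3, h4⟩

-- leave-one-out extremes: decomposition of eraseIdx into take ++ drop
theorem pvMaxOf_append_both {A B : List Int} (hA : A ≠ []) (hB : B ≠ []) :
    pvMaxOf (A ++ B) = max (pvMaxOf A) (pvMaxOf B) := by
  obtain ⟨a, A', rfl⟩ : ∃ a A', A = a :: A' := by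
    cases A with
    | nil => simp at hA
    | cons x y => exact ⟨x, y, rfl⟩
  obtain ⟨b, B', rfl⟩ : ∃ b B', B = b :: B' := by
    cases B with
    | nil => simp at hB
    | cons x y => exact ⟨x, y, rfl⟩
  show pvMax a (A' ++ b :: B') = max (pvMax a A') (pvMax b B')
  rw [pvMax_append]
  exact pvMax_cons _ _ _

theorem pvMinOf_append_both {A B : List Int} (hA : A ≠ []) (hB : B ≠ []) :
    pvMinOf (A ++ B) = min (pvMinOf A) (pvMinOf B) := by
  obtain ⟨a, A', rfl⟩ : ∃ a A', A = a :: A' := by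
    cases A with
    | nil => simp at hA
    | cons x y => exact ⟨x, y, rfl⟩
  obtain ⟨b, B', rfl⟩ : ∃ b B', B = b :: B' := by
    cases B with
    | nil => simp at hB
    | cons x y => exact ⟨x, y, rfl⟩
  show pvMin a (A' ++ b :: B') = min (pvMin a A') (pvMin b B')
  rw [pvMin_append]
  exact pvMin_cons _ _ _

theorem pvEraseIdx_td (l : List Int) (i : Nat) : l.eraseIdx i = l.take i ++ l.drop (i + 1) :=
  List.eraseIdx_eq_take_drop_succ l i

theorem pvLex_zero (ps : List (Int × Int)) :
    pvLex ps 0 = pvMaxOf ((ps.drop 1).map Prod.fst) := by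
  unfold pvLex
  rw [pvEraseIdx_td]
  simp [List.map_drop]

theorem pvRex_zero (ps : List (Int × Int)) :
    pvRex ps 0 = pvMinOf ((ps.drop 1).map Prod.snd) := by
  unfold pvRex
  rw [pvEraseIdx_td]
  simp [List.map_drop]

theorem pvLex_last {ps : List (Int × Int)} (hn : 1 ≤ ps.length) :
    pvLex ps (ps.length - 1) = pvMaxOf ((ps.take (ps.length - 1)).map Prod.fst) := by
  unfold pvLex
  rw [pvEraseIdx_td]
  have hd : (ps.map Prod.fst).drop (ps.length - 1 + 1) = [] := by
    apply List.drop_eq_nil_of_le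
    simp
    omega
  rw [hd, List.append_nil]
  simp [List.map_take]

theorem pvRex_last {ps : List (Int × Int)} (hn : 1 ≤ ps.length) :
    pvRex ps (ps.length - 1) = pvMinOf ((ps.take (ps.length - 1)).map Prod.snd) := by
  unfold pvRex
  rw [pvEraseIdx_td]
  have hd : (ps.map Prod.snd).drop (ps.length - 1 + 1) = [] := by
    apply List.drop_eq_nil_of_le
    simp
    omega
  rw [hd, List.append_nil]
  simp [List.map_take]

theorem pvLex_mid {ps : List (Int × Int)} {i : Nat} (h1 : 1 ≤ i) (h2 : i + 2 ≤ ps.length) :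
    pvLex ps i
      = max (pvMaxOf ((ps.take i).map Prod.fst)) (pvMaxOf ((ps.drop (i + 1)).map Prod.fst)) := by
  unfold pvLex
  rw [pvEraseIdx_td]
  have hA : (ps.map Prod.fst).take i ≠ [] := by
    have hlen : ((ps.map Prod.fst).take i).length = i := by simp; omega
    intro h; rw [h] at hlen; simp at hlen; omega
  have hB : (ps.map Prod.fst).drop (i + 1) ≠ [] := by
    have hlen : ((ps.map Prod.fst).drop (i + 1)).length = ps.length - (i + 1) := by simp
    intro h; rw [h] at hlen; simp at hlen; omega
  rw [pvMaxOf_append_both hA hB]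
  simp [List.map_take, List.map_drop]

theorem pvRex_mid {ps : List (Int × Int)} {i : Nat} (h1 : 1 ≤ i) (h2 : i + 2 ≤ ps.length) :
    pvRex ps i
      = min (pvMinOf ((ps.take i).map Prod.snd)) (pvMinOf ((ps.drop (i + 1)).map Prod.snd)) := by
  unfold pvRex
  rw [pvEraseIdx_td]
  have hA : (ps.map Prod.snd).take i ≠ [] := by
    have hlen : ((ps.map Prod.snd).take i).length = i := by simp; omega
    intro h; rw [h] at hlen; simp at hlen; omega
  have hB : (ps.map Prod.snd).drop (i + 1) ≠ [] := by
    have hlen : ((ps.map Prod.snd).drop (i + 1)).length = ps.length - (i + 1) := by simp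
    intro h; rw [h] at hlen; simp at hlen; omega
  rw [pvMinOf_append_both hA hB]
  simp [List.map_take, List.map_drop]

theorem pvD_pvI_le (A1 B1 A2 B2 : Int) :
    pvD (pvI (A1, B1) (A2, B2)) ≤ max 0 (min B1 B2 - max A1 A2) := by
  unfold pvD
  simp only [pvI_def]
  split_ifs with h <;> simp only at h ⊢ <;> omega

theorem pvD_pvI_nonneg {x y : Int × Int} (hx : x.1 ≤ x.2) (hy : y.1 ≤ y.2) :
    0 ≤ pvD (pvI x y) := by
  have := pvI_d_nonneg hx hy
  unfold pvD
  omega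

theorem pvI_pos_eq (A1 B1 A2 B2 : Int) (h : max A1 A2 < min B1 B2) :
    pvI (A1, B1) (A2, B2) = (max A1 A2, min B1 B2) := by
  simp only [pvI_def]
  rw [if_neg]
  simp only [not_or, not_lt]
  constructor <;> omega

-- AB1: every candidate of A is at most the clamped leave-one-out length
theorem pvCand_le {ps : List (Int × Int)} (hn : 2 ≤ ps.length) {i : Nat} (hi : i < ps.length) :
    pvCand ps i ≤ max 0 (pvTT ps i) := by
  have hne : ps ≠ [] := by intro h; rw [h] at hn; simp at hn
  have htt : pvTT ps i = pvRex ps i - pvLex ps i := rfl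
  unfold pvCand
  by_cases h0 : i = 0
  · subst h0
    rw [if_pos rfl, htt, pvLex_zero, pvRex_zero]
    rcases pvSj_inv (ps := ps) 1 (by omega) with h | ⟨h, hv⟩ <;> rw [h] <;> unfold pvD <;>
      simp only <;> omega
  · rw [if_neg h0]
    by_cases hl : i = ps.length - 1
    · subst hl
      rw [if_pos rfl, htt, pvLex_last (by omega), pvRex_last (by omega)]
      have hP := pvPk_inv hne (ps.length - 2)
      have e : ps.length - 2 + 1 = ps.length - 1 := by omega
      rw [e] at hP
      rcases hP with h | ⟨h, hv⟩ <;> rw [h] <;> unfold pvD <;> simp only <;> omega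
    · rw [if_neg hl]
      have h1 : 1 ≤ i := by omega
      have h2 : i + 2 ≤ ps.length := by omega
      rw [htt, pvLex_mid h1 h2, pvRex_mid h1 h2]
      have hP := pvPk_inv hne (i - 1)
      have e : i - 1 + 1 = i := by omega
      rw [e] at hP
      have hS := pvSj_inv (ps := ps) (i + 1) (by omega)
      rcases hP with hP | ⟨hP, hvP⟩ <;> rcases hS with hS | ⟨hS, hvS⟩ <;> rw [hP, hS] <;>
        [skip; skip; skip; skip] <;>
        refine le_trans (pvD_pvI_le _ _ _ _) (by omega)

-- AB2: a strictly positive leave-one-out length is computed exactly by A's candidate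
theorem pvCand_eq_of_pos {ps : List (Int × Int)} (hn : 2 ≤ ps.length) {i : Nat}
    (hi : i < ps.length) (hpos : 0 < pvTT ps i) : pvCand ps i = pvTT ps i := by
  have hne : ps ≠ [] := by intro h; rw [h] at hn; simp at hn
  have htt : pvTT ps i = pvRex ps i - pvLex ps i := rfl
  unfold pvCand
  by_cases h0 : i = 0
  · subst h0
    rw [if_pos rfl, htt, pvLex_zero, pvRex_zero]
    rw [htt, pvLex_zero, pvRex_zero] at hpos
    rcases pvSj_inv (ps := ps) 1 (by omega) with h | ⟨h, hv⟩
    · rw [h]; rfl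
    · exfalso; omega
  · rw [if_neg h0]
    by_cases hl : i = ps.length - 1
    · subst hl
      rw [if_pos rfl, htt, pvLex_last (by omega), pvRex_last (by omega)]
      rw [htt, pvLex_last (by omega), pvRex_last (by omega)] at hpos
      have hP := pvPk_inv hne (ps.length - 2)
      have e : ps.length - 2 + 1 = ps.length - 1 := by omega
      rw [e] at hP
      rcases hP with h | ⟨h, hv⟩
      · rw [h]; rfl
      · exfalso; omega
    · rw [if_neg hl]
      have h1 : 1 ≤ i := by omega
      have h2 : i + 2 ≤ ps.length := by omega
      rw [htt, pvLex_mid h1 h2, pvRex_mid h1 h2]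
      rw [htt, pvLex_mid h1 h2, pvRex_mid h1 h2] at hpos
      have hP := pvPk_inv hne (i - 1)
      have e : i - 1 + 1 = i := by omega
      rw [e] at hP
      have hS := pvSj_inv (ps := ps) (i + 1) (by omega)
      rcases hP with hP | ⟨hP, hvP⟩
      · rcases hS with hS | ⟨hS, hvS⟩
        · rw [hP, hS, pvI_pos_eq _ _ _ _ (by omega)]
          rfl
        · exfalso; omega
      · exfalso; omega

theorem pvPk_zero_d {ps : List (Int × Int)} (hne : ps ≠ []) : 0 ≤ pvD (pvPk ps 0) := by
  obtain ⟨h, t, rfl⟩ : ∃ h t, ps = h :: t := by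
    cases ps with
    | nil => simp at hne
    | cons a b => exact ⟨a, b, rfl⟩
  rw [pvPk_zero]
  exact pvN_d_nonneg h

-- AB3: some candidate of A is nonnegative (the key absorption argument: once both a prefix
-- state and the adjacent suffix state are invalid, the suffix fold hits two invalid
-- intervals, collapses to the absorbing (0,0) sentinel, and stays there down to index 1)
theorem pvCand_exists_nonneg {ps : List (Int × Int)} (hn : 2 ≤ ps.length) :
    ∃ i, i < ps.length ∧ 0 ≤ pvCand ps i := by
  have hne : ps ≠ [] := by intro h; rw [h] at hn; simp at hn
  by_cases hlast : 0 ≤ pvD (pvPk ps (ps.length - 2))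
  · refine ⟨ps.length - 1, by omega, ?_⟩
    unfold pvCand
    rw [if_neg (by omega), if_pos rfl]
    exact hlast
  by_cases hfirst : 0 ≤ pvD (pvSj ps 1)
  · refine ⟨0, by omega, ?_⟩
    unfold pvCand
    rw [if_pos rfl]
    exact hfirst
  push_neg at hlast hfirst
  obtain ⟨m, hm1, hm2, hm3, hm4⟩ :=
    pvExistsFirstNeg (fun k => pvD (pvPk ps k)) (ps.length - 2) (pvPk_zero_d hne) hlast
  have e : m - 1 + 1 = m := by omega
  have hstep := pvPk_succ (ps := ps) (m - 1) (by omega)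
  simp only [e] at hstep
  have henter := pvI_invalid_enter (s := pvPk ps (m - 1)) (p := ps[m]'(by omega))
    (by unfold pvD at hm4; omega) (by rw [← hstep]; unfold pvD at hm3; omega)
  obtain ⟨hrowinv, _⟩ := henter
  by_cases hSm : 0 ≤ pvD (pvSj ps (m + 1))
  · refine ⟨m, by omega, ?_⟩
    unfold pvCand
    rw [if_neg (by omega), if_neg (by omega)]
    exact pvD_pvI_nonneg (by unfold pvD at hm4; omega) (by unfold pvD at hSm; omega)
  · exfalso
    push_neg at hSm
    have hSm' : (pvSj ps (m + 1)).2 < (pvSj ps (m + 1)).1 := by unfold pvD at hSm; omega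
    have hSmz : pvSj ps m = (0, 0) := by
      rw [pvSj_step m (by omega)]
      exact pvI_invalid_invalid hSm' hrowinv
    have habs : ∀ d j, j + d = m → 1 ≤ j → pvSj ps j = (0, 0) := by
      intro d
      induction d with
      | zero => intro j hj _; rw [show j = m from by omega]; exact hSmz
      | succ d ih =>
          intro j hj hj1
          rw [pvSj_step j (by omega)]
          rw [ih (j + 1) (by omega) (by omega)]
          exact pvI_zero_left _
    have h1z : pvSj ps 1 = (0, 0) := habs (m - 1) 1 (by omega) le_rfl
    rw [h1z] at hfirst
    exact absurd hfirst (by norm_num [pvD])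

-- B-side: the two extreme entries of a sorted copy give every leave-one-out extreme
theorem pvErase_perm {xs : List Int} {i : Nat} (hi : i < xs.length) {ls : List Int}
    (hperm : ls.Perm xs) : (xs.eraseIdx i).Perm (ls.erase xs[i]) := by
  have hmem : xs[i] ∈ ls := hperm.mem_iff.2 (xs.getElem_mem hi)
  have h1 : xs = xs.take i ++ xs[i] :: xs.drop (i + 1) := by
    conv_lhs => rw [← List.take_append_drop i xs]
    rw [List.drop_eq_getElem_cons hi]
  have h2 : (xs[i] :: xs.eraseIdx i).Perm xs := by
    rw [pvEraseIdx_td]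
    conv_rhs => rw [h1]
    exact (List.perm_middle).symm
  have h3 : (xs[i] :: ls.erase xs[i]).Perm ls := (List.perm_cons_erase hmem).symm
  exact List.Perm.cons_inv (h2.trans (hperm.symm.trans h3.symm))

theorem pvTopTwoMax {xs : List Int} {a b : Int} {rest : List Int}
    (hs : PySem.List.sorted xs (fun x => x) true = a :: b :: rest)
    {i : Nat} (hi : i < xs.length) :
    pvMaxOf (xs.eraseIdx i) = if xs[i] = a ∧ a ≠ b then b else a := by
  have hperm : (a :: b :: rest).Perm xs := by
    rw [← hs]; exact PySem.List.sorted_perm ..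
  have hpw : (a :: b :: rest).Pairwise (fun p q => q ≤ p) := by
    rw [← hs]; exact PySem.List.sorted_pairwise_rev ..
  have hpe := pvErase_perm hi hperm
  have hxlen : 2 ≤ xs.length := by
    have := hperm.length_eq; simp at this; omega
  have hlen2 : (xs.eraseIdx i).length = xs.length - 1 := by
    rw [pvEraseIdx_td]
    simp
    omega
  have hne : xs.eraseIdx i ≠ [] := by
    intro h
    rw [h] at hlen2
    simp at hlen2
    omega
  rw [pvMaxOf_perm hpe hne]
  have hb : ∀ x ∈ b :: rest, x ≤ a := (List.pairwise_cons.1 hpw).1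
  have hr : ∀ x ∈ rest, x ≤ b := (List.pairwise_cons.1 (List.pairwise_cons.1 hpw).2).1
  by_cases hv : xs[i] = a
  · rw [hv, List.erase_cons_head]
    have hbb : pvMaxOf (b :: rest) = b := pvMax_all_le hr
    by_cases hab : a = b
    · rw [if_neg (by simp [hab])]
      exact hbb.trans hab.symm
    · rw [if_pos ⟨rfl, hab⟩]
      exact hbb
  · rw [List.erase_cons_tail (by simpa using Ne.symm hv)]
    rw [if_neg (by intro hc; exact hv hc.1)]
    exact pvMax_all_le (fun x hx => hb x (List.mem_of_mem_erase hx))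

theorem pvTopTwoMin {xs : List Int} {a b : Int} {rest : List Int}
    (hs : PySem.List.sorted xs (fun x => x) false = a :: b :: rest)
    {i : Nat} (hi : i < xs.length) :
    pvMinOf (xs.eraseIdx i) = if xs[i] = a ∧ a ≠ b then b else a := by
  have hperm : (a :: b :: rest).Perm xs := by
    rw [← hs]; exact PySem.List.sorted_perm ..
  have hpw : (a :: b :: rest).Pairwise (fun p q => p ≤ q) := by
    rw [← hs]; exact PySem.List.sorted_pairwise ..
  have hpe := pvErase_perm hi hperm
  have hxlen : 2 ≤ xs.length := by
    have := hperm.length_eq; simp at this; omega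
  have hlen2 : (xs.eraseIdx i).length = xs.length - 1 := by
    rw [pvEraseIdx_td]
    simp
    omega
  have hne : xs.eraseIdx i ≠ [] := by
    intro h
    rw [h] at hlen2
    simp at hlen2
    omega
  rw [pvMinOf_perm hpe hne]
  have hb : ∀ x ∈ b :: rest, a ≤ x := (List.pairwise_cons.1 hpw).1
  have hr : ∀ x ∈ rest, b ≤ x := (List.pairwise_cons.1 (List.pairwise_cons.1 hpw).2).1
  by_cases hv : xs[i] = a
  · rw [hv, List.erase_cons_head]
    have hbb : pvMinOf (b :: rest) = b := pvMin_all_ge hr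
    by_cases hab : a = b
    · rw [if_neg (by simp [hab])]
      exact hbb.trans hab.symm
    · rw [if_pos ⟨rfl, hab⟩]
      exact hbb
  · rw [List.erase_cons_tail (by simpa using Ne.symm hv)]
    rw [if_neg (by intro hc; exact hv hc.1)]
    exact pvMin_all_ge (fun x hx => hb x (List.mem_of_mem_erase hx))

-- bridges between the ports and the abstract candidate/leave-one-out formulations
theorem pvTwoSplit {α : Type} {l : List α} (h : 2 ≤ l.length) : ∃ a b r, l = a :: b :: r := by
  cases l with
  | nil => simp at h
  | cons x t =>
      cases t with
      | nil => simp at h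
      | cons y u => exact ⟨x, y, u, rfl⟩

theorem pvPref_get {ps : List (Int × Int)} (s : Int × Int) (i : Int) (h0 : 0 ≤ i)
    (hi : i < (ps.length : Int)) :
    (PySem.List.pyGet? (pvScan s ps) i).getD (0, 0) = pvFF s (ps.take (i.toNat + 1)) := by
  rw [PySem.List.pyGet?_of_nonneg _ h0]
  rw [List.getElem?_eq_getElem (by rw [pvScan_length]; omega)]
  simp only [Option.getD_some]
  exact pvScan_getElem ps s i.toNat (by omega)

theorem pvSuff_get {ps : List (Int × Int)} (s : Int × Int) (j : Int) (h0 : 0 ≤ j)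
    (hj : j < (ps.length : Int)) :
    (PySem.List.pyGet? (pvScan s ps.reverse).reverse j).getD (0, 0)
      = pvFF s (ps.reverse.take (ps.length - j.toNat)) := by
  rw [PySem.List.pyGet?_of_nonneg _ h0]
  have hlen : (pvScan s ps.reverse).length = ps.length := by rw [pvScan_length]; simp
  rw [List.getElem?_reverse (by rw [hlen]; omega)]
  have hidx : (pvScan s ps.reverse).length - 1 - j.toNat = ps.length - 1 - j.toNat := by
    rw [hlen]
  rw [hidx]
  rw [List.getElem?_eq_getElem (by rw [hlen]; omega)]
  simp only [Option.getD_some]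
  rw [pvScan_getElem ps.reverse s (ps.length - 1 - j.toNat)
    (by simp only [List.length_reverse]; omega)]
  have hfin : ps.length - 1 - j.toNat + 1 = ps.length - j.toNat := by omega
  rw [hfin]

def pvLs (z : List (List Int)) : List Int := PySem.List.sorted (z.map pvRow0) (fun x => x) true
def pvRs (z : List (List Int)) : List Int := PySem.List.sorted (z.map pvRow1) (fun x => x) false

def pvVal (z : List (List Int)) (row : List Int) : Int :=
  (if pvRow1 row = (PySem.List.pyGet? (pvRs z) 0).getD 0
      ∧ (PySem.List.pyGet? (pvRs z) 0).getD 0 ≠ (PySem.List.pyGet? (pvRs z) 1).getD 0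
    then (PySem.List.pyGet? (pvRs z) 1).getD 0 else (PySem.List.pyGet? (pvRs z) 0).getD 0)
  - (if pvRow0 row = (PySem.List.pyGet? (pvLs z) 0).getD 0
      ∧ (PySem.List.pyGet? (pvLs z) 0).getD 0 ≠ (PySem.List.pyGet? (pvLs z) 1).getD 0
    then (PySem.List.pyGet? (pvLs z) 1).getD 0 else (PySem.List.pyGet? (pvLs z) 0).getD 0)

theorem pvCoreB (z : List (List Int)) (h2 : 2 ≤ z.length) :
    core_logic_alt z = pvMax 0 (z.map (pvVal z)) := by
  unfold core_logic_alt
  rw [if_neg (by push_neg; exact_mod_cast h2)]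
  unfold pvMax
  rw [List.foldl_map]
  rfl

theorem pvVal_eq {z : List (List Int)} (h2 : 2 ≤ z.length) {i : Nat} (hi : i < z.length) :
    pvVal z (z[i]'hi) = pvTT (pvPs z) i := by
  obtain ⟨a, b, restl, hls⟩ := pvTwoSplit (l := pvLs z)
    (by rw [pvLs, PySem.List.length_sorted]; simpa using h2)
  obtain ⟨c, d, restr, hrs⟩ := pvTwoSplit (l := pvRs z)
    (by rw [pvRs, PySem.List.length_sorted]; simpa using h2)
  have hmapf : (pvPs z).map Prod.fst = z.map pvRow0 := by
    simp [pvPs, List.map_map, Function.comp]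
  have hmaps : (pvPs z).map Prod.snd = z.map pvRow1 := by
    simp [pvPs, List.map_map, Function.comp]
  have hif : i < (z.map pvRow0).length := by simpa using hi
  have his : i < (z.map pvRow1).length := by simpa using hi
  have hL := pvTopTwoMax (show PySem.List.sorted (z.map pvRow0) (fun x => x) true = a :: b :: restl from hls) hif
  have hR := pvTopTwoMin (show PySem.List.sorted (z.map pvRow1) (fun x => x) false = c :: d :: restr from hrs) his
  have hgf : (z.map pvRow0)[i]'hif = pvRow0 (z[i]'hi) := by simp
  have hgs : (z.map pvRow1)[i]'his = pvRow1 (z[i]'hi) := by simp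
  rw [hgf] at hL
  rw [hgs] at hR
  have hp1 : (0 : Int) ≤ (restl.length : Int) + 1 := by positivity
  have hp2 : (0 : Int) ≤ (restr.length : Int) + 1 := by positivity
  have e1 : (PySem.List.pyGet? (a :: b :: restl) 0).getD 0 = a := by
    simp [PySem.List.pyGet?, PySem.List.pyIdx?, hp1]
  have e2 : (PySem.List.pyGet? (a :: b :: restl) 1).getD 0 = b := by
    simp [PySem.List.pyGet?, PySem.List.pyIdx?, hp1]
  have e3 : (PySem.List.pyGet? (c :: d :: restr) 0).getD 0 = c := by
    simp [PySem.List.pyGet?, PySem.List.pyIdx?, hp2]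
  have e4 : (PySem.List.pyGet? (c :: d :: restr) 1).getD 0 = d := by
    simp [PySem.List.pyGet?, PySem.List.pyIdx?, hp2]
  unfold pvVal
  rw [hls, hrs, e1, e2, e3, e4]
  unfold pvTT pvLex pvRex
  rw [hmapf, hmaps, hL, hR]

theorem pvCoreA (z : List (List Int)) (h2 : 2 ≤ z.length) :
    core_logic z
      = (PySem.List.pyRange 1 ((z.length : Int) - 1) 1).foldl
          (fun ans i => max ans (pvCand (pvPs z) i.toNat))
          (max (pvCand (pvPs z) 0) (pvCand (pvPs z) (z.length - 1))) := by
  have hne : z ≠ [] := by intro h; rw [h] at h2; simp at h2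
  have hpslen : (pvPs z).length = z.length := by simp [pvPs]
  obtain ⟨r, tz, hz⟩ : ∃ r tz, z = r :: tz := by
    cases z with
    | nil => simp at hne
    | cons x y => exact ⟨x, y, rfl⟩
  obtain ⟨y, ys, hrev⟩ : ∃ y ys, z.reverse = y :: ys := by
    cases hv : z.reverse with
    | nil =>
        have hl0 : z.length = 0 := by simpa using congrArg List.length hv
        omega
    | cons p q => exact ⟨p, q, rfl⟩
  have hz0 : (PySem.List.pyGet? z 0).getD [] = z.headI := by
    rw [hz, PySem.List.pyGet?_zero_cons]
    rfl
  have hzl : (PySem.List.pyGet? z (-1)).getD [] = z.reverse.headI := by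
    rw [PySem.List.pyGet?_neg_one, List.getLast?_eq_head?_reverse, hrev]
    rfl
  have hheadps : (pvPs z).headI = (pvRow0 z.headI, pvRow1 z.headI) := by rw [hz]; rfl
  have hrevps : (pvPs z).reverse.headI = (pvRow0 z.reverse.headI, pvRow1 z.reverse.headI) := by
    rw [pvPs, ← List.map_reverse, hrev]
    rfl
  have hmap1 : z.map (fun row => (pvRow0 row, pvRow1 row)) = pvPs z := rfl
  have hmaprev : z.reverse.map (fun row => (pvRow0 row, pvRow1 row)) = (pvPs z).reverse := by
    rw [List.map_reverse]
    rfl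
  have hsP : pvInter (pvRow0 z.headI) (pvRow1 z.headI) (pvRow0 z.headI) (pvRow1 z.headI)
      = pvN ((pvPs z).headI) := by
    rw [hheadps]
    rfl
  have hsS : pvInter (pvRow0 z.reverse.headI) (pvRow1 z.reverse.headI)
        (pvRow0 z.reverse.headI) (pvRow1 z.reverse.headI)
      = pvN ((pvPs z).reverse.headI) := by
    rw [hrevps]
    rfl
  have hgp : ∀ (i : Int), 0 ≤ i → i < (z.length : Int) →
      (PySem.List.pyGet? (pvScan (pvN ((pvPs z).headI)) (pvPs z)) i).getD (0, 0)
        = pvPk (pvPs z) i.toNat := by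
    intro i h0 hii
    rw [pvPref_get _ i h0 (by rw [hpslen]; exact hii)]
    rfl
  have hgs : ∀ (j : Int), 0 ≤ j → j < (z.length : Int) →
      (PySem.List.pyGet? (pvScan (pvN ((pvPs z).reverse.headI)) (pvPs z).reverse).reverse j).getD (0, 0)
        = pvSj (pvPs z) j.toNat := by
    intro j h0 hj
    rw [pvSuff_get _ j h0 (by rw [hpslen]; exact hj)]
    rfl
  simp only [core_logic]
  rw [if_neg (by rw [Int.natCast_eq_zero]; omega)]
  rw [if_neg (by exact_mod_cast (by omega : ¬(z.length = 1)))]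
  rw [hz0, hzl]
  rw [pvFold_scan_snd, pvFold_scan_snd]
  rw [hmap1, hmaprev, List.nil_append, List.nil_append]
  rw [hsP, hsS]
  have e1 : ((1 : Int)).toNat = 1 := rfl
  have e2 : (((z.length : Int)) - 2).toNat = z.length - 2 := by omega
  have hinit :
      max (((PySem.List.pyGet? (pvScan (pvN ((pvPs z).reverse.headI)) (pvPs z).reverse).reverse 1).getD (0, 0)).2
            - ((PySem.List.pyGet? (pvScan (pvN ((pvPs z).reverse.headI)) (pvPs z).reverse).reverse 1).getD (0, 0)).1)
          (((PySem.List.pyGet? (pvScan (pvN ((pvPs z).headI)) (pvPs z)) ((z.length : Int) - 2)).getD (0, 0)).2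
            - ((PySem.List.pyGet? (pvScan (pvN ((pvPs z).headI)) (pvPs z)) ((z.length : Int) - 2)).getD (0, 0)).1)
        = max (pvCand (pvPs z) 0) (pvCand (pvPs z) (z.length - 1)) := by
    rw [hgs 1 (by norm_num) (by omega), hgp ((z.length : Int) - 2) (by omega) (by omega)]
    rw [e1, e2]
    unfold pvCand
    rw [hpslen]
    rw [if_pos rfl, if_neg (by omega), if_pos rfl]
    rfl
  rw [hinit]
  apply PySem.List.foldl_congr_mem
  intro acc x hx
  obtain ⟨hx1, hx2⟩ := (PySem.List.mem_pyRange_one).1 hx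
  rw [hgp (x - 1) (by omega) (by omega), hgs (x + 1) (by omega) (by omega)]
  have ex1 : (x - 1).toNat = x.toNat - 1 := by omega
  have ex2 : (x + 1).toNat = x.toNat + 1 := by omega
  rw [ex1, ex2]
  have hCx : pvCand (pvPs z) x.toNat
      = pvD (pvI (pvPk (pvPs z) (x.toNat - 1)) (pvSj (pvPs z) (x.toNat + 1))) := by
    unfold pvCand
    rw [hpslen]
    rw [if_neg (by omega), if_neg (by omega)]
  rw [hCx]
  rfl

theorem pvMainBig {z : List (List Int)} (h2 : 2 ≤ z.length) :
    core_logic z = core_logic_alt z := by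
  have hps : (pvPs z).length = z.length := by simp [pvPs]
  rw [pvCoreA z h2, pvCoreB z h2]
  have hAfold : (PySem.List.pyRange 1 ((z.length : Int) - 1) 1).foldl
        (fun ans i => max ans (pvCand (pvPs z) i.toNat))
        (max (pvCand (pvPs z) 0) (pvCand (pvPs z) (z.length - 1)))
      = pvMax (max (pvCand (pvPs z) 0) (pvCand (pvPs z) (z.length - 1)))
          ((PySem.List.pyRange 1 ((z.length : Int) - 1) 1).map
            (fun i => pvCand (pvPs z) i.toNat)) := by
    unfold pvMax
    rw [List.foldl_map]
  rw [hAfold]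
  have h0B : (0 : Int) ≤ pvMax 0 (z.map (pvVal z)) := le_pvMax_init _ _
  have httB : ∀ i, (hi : i < z.length) → pvTT (pvPs z) i ≤ pvMax 0 (z.map (pvVal z)) := by
    intro i hi
    rw [← pvVal_eq h2 hi]
    exact le_pvMax_mem _ (List.mem_map_of_mem (z.getElem_mem hi))
  have hcandB : ∀ i, i < z.length → pvCand (pvPs z) i ≤ pvMax 0 (z.map (pvVal z)) := by
    intro i hi
    refine le_trans (pvCand_le (by omega) (by omega)) (max_le h0B (httB i hi))
  have hcandA : ∀ i, i < z.length →
      pvCand (pvPs z) i ≤ pvMax (max (pvCand (pvPs z) 0) (pvCand (pvPs z) (z.length - 1)))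
        ((PySem.List.pyRange 1 ((z.length : Int) - 1) 1).map
          (fun i => pvCand (pvPs z) i.toNat)) := by
    intro i hi
    by_cases hi0 : i = 0
    · subst hi0
      exact le_trans (le_max_left _ _) (le_pvMax_init _ _)
    by_cases hil : i = z.length - 1
    · rw [hil]
      exact le_trans (le_max_right _ _) (le_pvMax_init _ _)
    · apply le_pvMax_mem
      apply List.mem_map.2
      refine ⟨(i : Int), ?_, by simp⟩
      apply (PySem.List.mem_pyRange_one).2
      constructor
      · exact_mod_cast Nat.one_le_iff_ne_zero.2 hi0
      · have : i < z.length - 1 := by omega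
        push_cast
        omega
  apply le_antisymm
  · apply pvMax_le
    · exact max_le (hcandB 0 (by omega)) (hcandB (z.length - 1) (by omega))
    · intro x hx
      obtain ⟨iInt, hmem, rfl⟩ := List.mem_map.1 hx
      have hrange := (PySem.List.mem_pyRange_one).1 hmem
      exact hcandB iInt.toNat (by omega)
  · have h0A : (0 : Int) ≤ pvMax (max (pvCand (pvPs z) 0) (pvCand (pvPs z) (z.length - 1)))
        ((PySem.List.pyRange 1 ((z.length : Int) - 1) 1).map
          (fun i => pvCand (pvPs z) i.toNat)) := by
      obtain ⟨i, hi, hnn⟩ := pvCand_exists_nonneg (ps := pvPs z) (by omega)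
      exact le_trans hnn (hcandA i (by omega))
    apply pvMax_le h0A
    intro x hx
    obtain ⟨row, hrow, rfl⟩ := List.mem_map.1 hx
    obtain ⟨i, hi, hieq⟩ := List.mem_iff_getElem.1 hrow
    rw [← hieq, pvVal_eq h2 hi]
    by_cases hpos : 0 < pvTT (pvPs z) i
    · rw [← pvCand_eq_of_pos (by omega) (by omega) hpos]
      exact hcandA i hi
    · exact le_trans (by omega) h0A

-- ===== VERDICT (by name: the statement is the Claim_ definition above) =====
theorem core_logic_spec : Claim_equal_core_logic := by
  unfold Claim_equal_core_logic Spec_core_logic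
  intro z _ _
  cases z with
  | nil => rfl
  | cons r t =>
      cases t with
      | nil => rfl
      | cons r2 t2 => exact pvMainBig (by simp)
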